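-- pv_equiv track=rewrite | github.com/klx-buct/- | SLR1/slr1.py | deal_str
-- ===== SOURCE A (Python) =====
-- def deal_str(s):  # 提取每个字符串中的非终结符和终结符
--     lst = list(s)
--     try:
--         while True:
--             index = lst.index("'")
--             lst[index - 1] = lst[index - 1] + "'"
--             del lst[index]
--     except:
--         pass
--     if 'n' in lst:
--         index = lst.index('n')
--         try:
--             if lst[index + 1] == 'u' and lst[index + 2] == 'l' and lst[index + 3] == 'l':
--                 lst[index] = 'null'
--                 del lst[index + 1]
--                 del lst[index + 1]
--                 del lst[index + 1]
--         except:
--             pass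
--     return lst
-- ===== SOURCE B (Python) =====
-- def deal_str(s):  # one left-to-right pass: attach apostrophes to the previous token, then collapse the first 'n','u','l','l' run
--     out = []
--     for c in s:
--         if c == "'" and out:
--             out[-1] += c
--         else:
--             out.append(c)
--     if 'n' in out:
--         i = out.index('n')
--         if out[i + 1:i + 4] == ['u', 'l', 'l']:
--             out[i:i + 4] = ['null']
--     return out
-- ===== Notes on version B (the rewrite author's own statement) =====
-- stated objective: alternative
-- what changed: Replaces A's repeated global lst.index("'")+del scan-and-shrink loop with a single left-to-right pass that appends each apostrophe to the previous token, and replaces the try/except element-by-element null check with a slice comparison and splice.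
-- intended difference: On strings whose first character is an apostrophe, A wraps the index lst[index-1] around to the last element and attaches the leading apostrophes there (on a lone-apostrophe string it even returns an empty list), while B keeps a leading apostrophe as its own token (witness: A gives ["a'"], B gives ["'", "a"]), which is the intended merge-into-the-preceding-character behaviour. — e.g. on deal_str("'a"): A returns ["a'"], B returns ["'", "a"]
import Mathlib
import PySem

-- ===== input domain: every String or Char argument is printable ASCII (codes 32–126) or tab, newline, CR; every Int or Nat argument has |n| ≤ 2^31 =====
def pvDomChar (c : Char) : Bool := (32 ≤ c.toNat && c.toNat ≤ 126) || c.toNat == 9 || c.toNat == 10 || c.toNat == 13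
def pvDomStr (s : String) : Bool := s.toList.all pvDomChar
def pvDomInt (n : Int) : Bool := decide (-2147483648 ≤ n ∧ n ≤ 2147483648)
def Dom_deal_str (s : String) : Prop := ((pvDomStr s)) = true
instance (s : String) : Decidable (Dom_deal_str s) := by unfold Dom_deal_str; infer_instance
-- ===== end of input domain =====

-- B replaces A's repeated find-first-apostrophe/delete loop by a single left-to-right pass; on
-- strings starting with an apostrophe A's negative-index wraparound attaches it to the LAST
-- element, B keeps it as its own leading token (stated as the intended difference D_ below).


-- ===== PORT A =====
-- A's while-loop: every iteration deletes one element, so fuel = the list's length suffices;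
-- the loop exits when index? no longer finds "'".
def dealLoopA : Nat → List String → List String
  | 0, lst => lst
  | fuel + 1, lst =>
    match PySem.List.index? lst "'" with
    | none => lst
    | some i =>
        -- lst[index-1] = lst[index-1] + "'"   (Python read/write at i-1: for i = 0 the negative
        -- index -1 wraps to the last element; always in range here since "'" was found, so the
        -- total pyGetD/pySetD forms are exact)
        dealLoopA fuel
          ((PySem.List.pySetD lst ((i : Int) - 1)
              (PySem.List.pyGetD lst ((i : Int) - 1) "" ++ "'")).eraseIdx i)   -- del lst[index]

-- try: if lst[index+1]=='u' and lst[index+2]=='l' and lst[index+3]=='l': … except: pass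
-- (short-circuit, step for step: the first out-of-range read raises IndexError, caught → no change)
def dealNullA (lst : List String) : List String :=
  match PySem.List.index? lst "n" with          -- if 'n' in lst: index = lst.index('n')
  | none => lst
  | some i =>
    match PySem.List.pyGet? lst ((i : Int) + 1) with
    | none => lst
    | some a =>
      if a = "u" then
        match PySem.List.pyGet? lst ((i : Int) + 2) with
        | none => lst
        | some b =>
          if b = "l" then
            match PySem.List.pyGet? lst ((i : Int) + 3) with
            | none => lst
            | some c =>
              if c = "l" then
                -- lst[index] = 'null'; del lst[index+1] (three times)
                (((lst.set i "null").eraseIdx (i + 1)).eraseIdx (i + 1)).eraseIdx (i + 1)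
              else lst
          else lst
      else lst

def deal_str (s : String) : List String :=
  dealNullA (dealLoopA (s.toList.map (fun c => String.ofList [c])).length
    (s.toList.map (fun c => String.ofList [c])))      -- lst = list(s)

-- ===== PORT B =====
def dealStepB (out : List String) (c : Char) : List String :=
  if c = '\'' ∧ out ≠ [] then
    out.dropLast ++ [out.getLast! ++ String.ofList [c]]    -- out[-1] += c
  else
    out ++ [String.ofList [c]]                             -- out.append(c)

def dealNullB (out : List String) : List String :=
  match PySem.List.index? out "n" with          -- if 'n' in out: i = out.index('n')
  | none => out
  | some i =>
    if PySem.List.slice out (some ((i : Int) + 1)) (some ((i : Int) + 4)) = ["u", "l", "l"]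
    then out.take i ++ ["null"] ++ out.drop (i + 4)        -- out[i:i+4] = ['null']
    else out

def deal_str_alt (s : String) : List String :=
  dealNullB (s.toList.foldl dealStepB [])

-- ===== PRECONDITION & SPEC =====
-- On strings whose first character is an apostrophe, A's lst[index-1] wraps around (negative index)
-- and attaches the leading apostrophe(s) to the LAST element (on a lone-apostrophe string it even returns []), while B
-- keeps a leading apostrophe as its own token, the intended merging behaviour.
def D_deal_str (s : String) : Prop := s.toList.head? = some '\''
instance (s : String) : Decidable (D_deal_str s) := by unfold D_deal_str; infer_instance

def Spec_deal_str (s : String) (out : List String) : Prop := ¬ D_deal_str s → out = deal_str_alt s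
instance (s : String) (out : List String) : Decidable (Spec_deal_str s out) := by
  unfold Spec_deal_str; infer_instance

def pvDiffWitness_deal_str : String := "'a"
def pvDiffWitnessOut_deal_str : (List String) × (List String) := (["a'"], ["'", "a"])

-- ===== CLAIM (what is proved, stated in full; the proofs are below) =====
def Claim_unchanged_deal_str : Prop := ∀ (s : String), Dom_deal_str s → Spec_deal_str s (deal_str s)
def Claim_changed_deal_str : Prop :=
  Dom_deal_str (pvDiffWitness_deal_str) ∧ D_deal_str (pvDiffWitness_deal_str) ∧
  deal_str (pvDiffWitness_deal_str) = pvDiffWitnessOut_deal_str.1 ∧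
  deal_str_alt (pvDiffWitness_deal_str) = pvDiffWitnessOut_deal_str.2 ∧
  pvDiffWitnessOut_deal_str.1 ≠ pvDiffWitnessOut_deal_str.2

-- ===== LEMMAS AND PROOFS =====

-- the merged token list both programs produce: each character grabs the apostrophes right after it
def dealM : List Char → List String
  | [] => []
  | c :: cs =>
    String.ofList (c :: cs.takeWhile (· == '\'')) :: dealM (cs.dropWhile (· == '\''))
  termination_by cs => cs.length
  decreasing_by simpa using Nat.lt_succ_of_le (List.length_dropWhile_le _ _)

lemma foldB_concat (cs : List Char) : ∀ (acc : List String) (t : String),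
    cs.foldl dealStepB (acc ++ [t]) =
      acc ++ String.ofList (t.toList ++ cs.takeWhile (· == '\'')) ::
        dealM (cs.dropWhile (· == '\'')) := by
  induction cs with
  | nil => intro acc t; simp [dealM]
  | cons c cs ih =>
    intro acc t
    by_cases hc : c = '\''
    · subst hc
      have h1 : dealStepB (acc ++ [t]) '\'' = acc ++ [t ++ String.ofList ['\'']] := by
        simp [dealStepB]
      simp only [List.foldl_cons, h1]
      rw [ih acc (t ++ String.ofList ['\''])]
      simp [String.toList_append]
    · have h1 : dealStepB (acc ++ [t]) c = (acc ++ [t]) ++ [String.ofList [c]] := by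
        simp [dealStepB, hc]
      simp only [List.foldl_cons, h1]
      rw [ih (acc ++ [t]) (String.ofList [c])]
      simp [dealM, hc]

lemma foldB_eq_M (cs : List Char) : cs.foldl dealStepB [] = dealM cs := by
  cases cs with
  | nil => simp [dealM]
  | cons c cs =>
    have h1 : dealStepB [] c = [] ++ [String.ofList [c]] := by simp [dealStepB]
    simp only [List.foldl_cons, h1]
    rw [foldB_concat cs [] (String.ofList [c])]
    simp [dealM]

lemma idx_none (l : List String) (h : ∀ x ∈ l, x ≠ "'") : PySem.List.index? l "'" = none := by
  rw [PySem.List.index?_eq_none_iff]; exact fun hm => h _ hm rfl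

lemma idx_first (T : List String) (t : String) (r : List String)
    (hT : ∀ x ∈ T, x ≠ "'") (ht : t ≠ "'") :
    PySem.List.index? (T ++ t :: "'" :: r) "'" = some (T.length + 1) := by
  induction T with
  | nil =>
    simp only [List.nil_append]
    rw [PySem.List.index?_cons_of_ne _ ht, PySem.List.index?_cons_self]; rfl
  | cons x T ih =>
    have hx : x ≠ "'" := hT x (by simp)
    simp only [List.cons_append]
    rw [PySem.List.index?_cons_of_ne _ hx, ih (fun y hy => hT y (by simp [hy]))]
    simp [Nat.add_comm]

lemma set_len (T : List String) (t x : String) (r : List String) :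
    (T ++ t :: r).set T.length x = T ++ x :: r := by
  induction T with
  | nil => simp
  | cons y T ih => simp [ih]

lemma getD_len (T : List String) (t : String) (r : List String) (d : String) :
    (T ++ t :: r).getD T.length d = t := by
  induction T with
  | nil => simp
  | cons y T ih => simpa using ih

lemma erase_len1 (T : List String) (a b : String) (r : List String) :
    (T ++ a :: b :: r).eraseIdx (T.length + 1) = T ++ a :: r := by
  induction T with
  | nil => simp
  | cons y T ih => simpa [List.eraseIdx] using ih

lemma loopA_no_apos (fuel : Nat) (l : List String) (h : ∀ x ∈ l, x ≠ "'") :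
    dealLoopA fuel l = l := by
  have h0 := idx_none l h
  cases fuel with
  | zero => rfl
  | succ f =>
    conv_lhs => unfold dealLoopA
    rw [h0]

lemma loopA_step (fuel : Nat) (lst : List String) (i : Nat)
    (h : PySem.List.index? lst "'" = some i) :
    dealLoopA (fuel + 1) lst =
      dealLoopA fuel ((PySem.List.pySetD lst ((i : Int) - 1)
        (PySem.List.pyGetD lst ((i : Int) - 1) "" ++ "'")).eraseIdx i) := by
  conv_lhs => unfold dealLoopA
  rw [h]

lemma ofList_apos : String.ofList ['\''] = "'" := by decide

lemma toList_ne_apos {t : String} (h : t.toList ≠ ['\'']) : t ≠ "'" := by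
  intro he; exact h (by rw [he]; decide)

lemma loopA_merge (cs : List Char) : ∀ (fuel : Nat) (T : List String) (t : String),
    cs.count '\'' ≤ fuel → (∀ x ∈ T, x ≠ "'") → t ≠ "'" → t.toList ≠ [] →
    dealLoopA fuel (T ++ t :: cs.map (fun c => String.ofList [c])) =
      T ++ String.ofList (t.toList ++ cs.takeWhile (· == '\'')) ::
        dealM (cs.dropWhile (· == '\'')) := by
  induction cs with
  | nil =>
    intro fuel T t _ hT ht _
    rw [loopA_no_apos fuel _ ?side]
    · simp [dealM]
    case side =>
      intro x hx
      rcases (by simpa using hx : x ∈ T ∨ x = t) with h1 | h2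
      · exact hT x h1
      · subst h2; exact ht
  | cons c cs ih =>
    intro fuel T t hcount hT ht htne
    by_cases hc : c = '\''
    · subst hc
      have hf : ∃ f, fuel = f + 1 := by
        rcases fuel with _ | f
        · exfalso; simp at hcount
        · exact ⟨_, rfl⟩
      rcases hf with ⟨f, rfl⟩
      have hmap : (('\'' :: cs).map (fun c => String.ofList [c])) =
          "'" :: cs.map (fun c => String.ofList [c]) := by
        simp [ofList_apos]
      rw [show dealLoopA (f + 1) (T ++ t :: ('\'' :: cs).map (fun c => String.ofList [c])) =
          dealLoopA (f + 1) (T ++ t :: "'" :: cs.map (fun c => String.ofList [c])) by rw [hmap]]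
      rw [loopA_step f _ _ (idx_first T t _ hT ht)]
      have hcast : ((((T.length + 1 : Nat)) : Int) - 1) = ((T.length : Nat) : Int) := by
        push_cast; ring
      rw [hcast, PySem.List.pyGetD_natCast, PySem.List.pySetD_natCast, getD_len, set_len,
        erase_len1]
      rw [ih f T (t ++ "'") (by simp at hcount ⊢; omega) hT
        (toList_ne_apos (by simp [String.toList_append]; intro h; exact htne (by simpa using h)))
        (by simp [String.toList_append])]
      simp [String.toList_append]
    · have hcb : (c == '\'') = false := by simpa using hc
      have hne : String.ofList [c] ≠ "'" := toList_ne_apos (by simp [hc])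
      have hassoc : T ++ t :: (c :: cs).map (fun c => String.ofList [c]) =
          (T ++ [t]) ++ String.ofList [c] :: cs.map (fun c => String.ofList [c]) := by simp
      rw [hassoc, ih fuel (T ++ [t]) (String.ofList [c])
        (by simpa [List.count_cons, hcb] using hcount)
        (by intro x hx
            rcases (by simpa using hx : x ∈ T ∨ x = t) with h1 | h2
            · exact hT x h1
            · subst h2; exact ht)
        hne (by simp)]
      simp [dealM, hcb]

lemma spliceA (i : Nat) : ∀ (l : List String), i + 3 < l.length →
    (((l.set i "null").eraseIdx (i + 1)).eraseIdx (i + 1)).eraseIdx (i + 1) =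
      l.take i ++ ["null"] ++ l.drop (i + 4) := by
  induction i with
  | zero =>
    intro l hl
    match l, hl with
    | a :: b :: c :: d :: r, _ => simp [List.eraseIdx]
  | succ i ih =>
    intro l hl
    match l, hl with
    | x :: l, hl =>
      have h : i + 3 < l.length := by simpa using hl
      simpa [List.eraseIdx, List.take, List.drop] using ih l h

lemma nullAB (l : List String) : dealNullA l = dealNullB l := by
  unfold dealNullA dealNullB
  cases hidx : PySem.List.index? l "n" with
  | none => rfl
  | some i =>
    dsimp only
    have h1 : ((i : Int) + 1) = (((i + 1 : Nat)) : Int) := by push_cast; ring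
    have h2 : ((i : Int) + 2) = (((i + 2 : Nat)) : Int) := by push_cast; ring
    have h3 : ((i : Int) + 3) = (((i + 3 : Nat)) : Int) := by push_cast; ring
    have h4 : ((i : Int) + 4) = (((i + 4 : Nat)) : Int) := by push_cast; ring
    rw [h1, h2, h3, h4, PySem.List.pyGet?_natCast, PySem.List.pyGet?_natCast,
      PySem.List.pyGet?_natCast, PySem.List.slice_natCast]
    have hd1 : l[i+1]? = (l.drop (i+1))[0]? := by simp
    have hd2 : l[i+2]? = (l.drop (i+1))[1]? := by rw [List.getElem?_drop]
    have hd3 : l[i+3]? = (l.drop (i+1))[2]? := by rw [List.getElem?_drop]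
    have htk : i + 4 - (i + 1) = 3 := by omega
    rw [hd1, hd2, hd3, htk]
    cases hd : l.drop (i + 1) with
    | nil => simp
    | cons a r1 =>
      cases r1 with
      | nil => simp
      | cons b r2 =>
        cases r2 with
        | nil => simp
        | cons c r =>
          simp only [List.getElem?_cons_zero, List.getElem?_cons_succ]
          have hsplice := spliceA i l (by
            have h := congrArg List.length hd
            simp [List.length_drop] at h
            omega)
          by_cases ha : a = "u" <;> by_cases hb : b = "l" <;> by_cases hc : c = "l" <;>
            simp [ha, hb, hc, List.take, hsplice]

-- ===== VERDICT (by name: the statement is the Claim_ definition above) =====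
theorem deal_str_spec : Claim_unchanged_deal_str := by
  intro s _ hD
  show deal_str s = deal_str_alt s
  unfold deal_str deal_str_alt
  rw [nullAB, foldB_eq_M]
  congr 1
  cases hs : s.toList with
  | nil => simp [dealM]; rfl
  | cons c cs =>
    have hc : c ≠ '\'' := fun h => hD (by simp [D_deal_str, hs, h])
    have hm : (c :: cs).map (fun c => String.ofList [c]) =
        [] ++ String.ofList [c] :: cs.map (fun c => String.ofList [c]) := by simp
    rw [hm, loopA_merge cs _ [] (String.ofList [c])
      (le_trans (List.count_le_length) (by simp))
      (by simp) (toList_ne_apos (by simp [hc])) (by simp)]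
    simp [dealM]

theorem deal_str_changed : Claim_changed_deal_str := by
  unfold Claim_changed_deal_str; decide
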